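-- pv_equiv track=rewrite | github.com/GaioTransposon/TA_BIO134 | scripts/TA_CH11.py | make_combos
-- ===== SOURCE A (Python) =====
-- def make_combos(l):
--     l2=[]
--     for i in l:
--         for j in l:
--             if j!=i:
--                 x = [j,i]
--                 x_inv = [i,j]
--                 if x_inv not in l2:
--                     l2.append(x)
--     return l2
-- ===== SOURCE B (Python) =====
-- def make_combos(l):
--     # Stateless: emit [j,i] exactly when value i first appears before value j.
--     return [[j, i] for i in l for j in l if i != j and l.index(i) < l.index(j)]
-- ===== Notes on version B (the rewrite author's own statement) =====
-- stated objective: faster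
-- what changed: Drops A's growing result list and its reverse-membership scan on every candidate pair; each pair is decided statelessly by first-occurrence order (l.index(i) < l.index(j)).
import Mathlib
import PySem

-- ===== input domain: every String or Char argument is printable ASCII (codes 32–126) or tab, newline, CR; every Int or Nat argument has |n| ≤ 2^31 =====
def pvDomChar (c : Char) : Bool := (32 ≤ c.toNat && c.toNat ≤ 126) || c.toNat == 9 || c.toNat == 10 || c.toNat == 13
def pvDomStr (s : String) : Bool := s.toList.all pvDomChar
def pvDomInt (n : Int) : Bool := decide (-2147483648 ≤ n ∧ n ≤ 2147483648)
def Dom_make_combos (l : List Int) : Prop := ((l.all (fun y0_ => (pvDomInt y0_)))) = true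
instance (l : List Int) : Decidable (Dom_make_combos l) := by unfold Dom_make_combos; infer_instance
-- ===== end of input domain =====

-- B replaces A's growing result list and reverse-membership test by a stateless
-- first-occurrence-order predicate (simpler; same return value, no mutation involved).

-- ===== PORT A =====
def make_combos (l : List Int) : List (List Int) :=
  l.foldl (fun l2 i =>
    l.foldl (fun l2 j =>
      if j ≠ i then
        if [i, j] ∉ l2 then l2 ++ [[j, i]] else l2
      else l2) l2) []

-- ===== PORT B =====
-- l.index(v) is ported as List.idxOf v l; exact here because index is only
-- evaluated at elements of l, where Python's list.index returns the first position.
def make_combos_alt (l : List Int) : List (List Int) :=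
  l.flatMap (fun i =>
    l.filterMap (fun j =>
      if i ≠ j ∧ List.idxOf i l < List.idxOf j l then some [j, i] else none))

-- ===== PRECONDITION & SPEC =====
def Spec_make_combos (l : List Int) (out : List (List Int)) : Prop := out = make_combos_alt l
instance (l : List Int) (out : List (List Int)) : Decidable (Spec_make_combos l out) := by unfold Spec_make_combos; infer_instance

-- ===== CLAIM (what is proved, stated in full; the proofs are below) =====
def Claim_equal_make_combos : Prop := ∀ (l : List Int), Dom_make_combos l → Spec_make_combos l (make_combos l)

-- ===== LEMMAS AND PROOFS =====

-- distinct elements of l have distinct first indices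
theorem pv_idx_inj {l : List Int} {a b : Int} (ha : a ∈ l) (hb : b ∈ l) (hne : a ≠ b) :
    List.idxOf a l ≠ List.idxOf b l := by
  intro h
  have hla : List.idxOf a l < l.length := List.idxOf_lt_length_of_mem ha
  have hlb : List.idxOf b l < l.length := List.idxOf_lt_length_of_mem hb
  have : l[List.idxOf a l]'hla = a := List.getElem_idxOf hla
  have hb' : l[List.idxOf b l]'hlb = b := List.getElem_idxOf hlb
  exact hne (by rw [← this, ← hb']; congr 1)

-- the first occurrence of the element standing right after a prefix is at or before the prefix end
theorem pv_idx_le_prefix (a : Int) (s : List Int) :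
    ∀ (pre : List Int), List.idxOf a (pre ++ a :: s) ≤ pre.length := by
  intro pre
  induction pre with
  | nil => simp [List.idxOf_cons_self]
  | cons p pre ih =>
      by_cases h : p = a
      · simp [h, List.idxOf_cons_self]
      · simp only [List.cons_append, List.idxOf_cons_ne _ (by simpa using h), List.length_cons]
        omega

-- an element of l whose first index is below the prefix length lies in the prefix
theorem pv_mem_prefix {pre rest : List Int} {j : Int} (hj : j ∈ pre ++ rest)
    (hlt : List.idxOf j (pre ++ rest) < pre.length) : j ∈ pre := by
  set l := pre ++ rest with hl
  have hlen : List.idxOf j l < l.length := List.idxOf_lt_length_of_mem hj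
  have hget : l[List.idxOf j l]'hlen = j := List.getElem_idxOf hlen
  have : (pre ++ rest)[List.idxOf j l]'(by simp [hl] at hlen ⊢; exact hlen) = pre[List.idxOf j l]'hlt := by
    exact List.getElem_append_left hlt
  have : pre[List.idxOf j l]'hlt = j := by rw [← this]; simpa [hl] using hget
  exact this ▸ List.getElem_mem hlt

-- inner loop of A over js, when [i,·]-membership of acc is characterised by
-- first-occurrence order, appends exactly B's filtered pairs
theorem pv_inner (l : List Int) (i : Int) (hi : i ∈ l) (js : List Int)
    (hjs : ∀ j ∈ js, j ∈ l) (acc : List (List Int))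
    (H : ∀ j ∈ js, j ≠ i → ([i, j] ∈ acc ↔ List.idxOf j l < List.idxOf i l)) :
    js.foldl (fun l2 j =>
        if j ≠ i then
          if [i, j] ∉ l2 then l2 ++ [[j, i]] else l2
        else l2) acc
      = acc ++ js.filterMap (fun j =>
          if i ≠ j ∧ List.idxOf i l < List.idxOf j l then some [j, i] else none) := by
  induction js generalizing acc with
  | nil => simp
  | cons j0 js ih =>
      have hjs' : ∀ j ∈ js, j ∈ l := fun j hj => hjs j (List.mem_cons_of_mem _ hj)
      by_cases hji : j0 = i
      · subst hji
        have hA : (if j0 ≠ j0 then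
            (if [j0, j0] ∉ acc then acc ++ [[j0, j0]] else acc) else acc) = acc := by simp
        have hB : (if j0 ≠ j0 ∧ List.idxOf j0 l < List.idxOf j0 l then
            some [j0, j0] else none) = none := by simp
        simp only [List.foldl_cons, List.filterMap_cons, hA, hB]
        exact ih hjs' acc (fun j hj hne => H j (List.mem_cons_of_mem _ hj) hne)
      · have hj0l : j0 ∈ l := hjs j0 List.mem_cons_self
        have hmem : [i, j0] ∈ acc ↔ List.idxOf j0 l < List.idxOf i l :=
          H j0 List.mem_cons_self hji
        have hne' : List.idxOf i l ≠ List.idxOf j0 l :=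
          pv_idx_inj hi hj0l (Ne.symm hji)
        by_cases hlt : List.idxOf i l < List.idxOf j0 l
        · -- A appends [j0,i]; B emits it too
          have hnot : [i, j0] ∉ acc := by rw [hmem]; omega
          have hA : (if j0 ≠ i then
              (if [i, j0] ∉ acc then acc ++ [[j0, i]] else acc) else acc)
              = acc ++ [[j0, i]] := by rw [if_pos hji, if_pos hnot]
          have hB : (if i ≠ j0 ∧ List.idxOf i l < List.idxOf j0 l then
              some [j0, i] else none) = some [j0, i] := if_pos ⟨Ne.symm hji, hlt⟩
          simp only [List.foldl_cons, List.filterMap_cons, hA, hB]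
          rw [ih hjs' (acc ++ [[j0, i]]) (fun j hj hne => by
            rw [List.mem_append]
            constructor
            · rintro (h | h)
              · exact (H j (List.mem_cons_of_mem _ hj) hne).mp h
              · exfalso; simp at h; exact hne h.2
            · intro h; exact Or.inl ((H j (List.mem_cons_of_mem _ hj) hne).mpr h))]
          simp
        · -- A skips (the reversed pair is already present); B emits nothing
          have hin : [i, j0] ∈ acc := by rw [hmem]; omega
          have hA : (if j0 ≠ i then
              (if [i, j0] ∉ acc then acc ++ [[j0, i]] else acc) else acc) = acc := by
            rw [if_pos hji, if_neg (by simpa using hin)]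
          have hB : (if i ≠ j0 ∧ List.idxOf i l < List.idxOf j0 l then
              some [j0, i] else none) = none := if_neg (fun h => hlt h.2)
          simp only [List.foldl_cons, List.filterMap_cons, hA, hB]
          exact ih hjs' acc (fun j hj hne => H j (List.mem_cons_of_mem _ hj) hne)

-- membership in B's per-i contribution
theorem pv_mem_new {l : List Int} {i : Int} {x y : Int} :
    [x, y] ∈ l.filterMap (fun j =>
        if i ≠ j ∧ List.idxOf i l < List.idxOf j l then some [j, i] else none)
      ↔ (y = i ∧ x ∈ l ∧ i ≠ x ∧ List.idxOf i l < List.idxOf x l) := by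
  simp only [List.mem_filterMap]
  constructor
  · rintro ⟨j, hj, hsome⟩
    by_cases hc : i ≠ j ∧ List.idxOf i l < List.idxOf j l
    · rw [if_pos hc] at hsome
      obtain ⟨hx, hy⟩ : j = x ∧ i = y := by simpa using hsome
      subst hx; subst hy
      exact ⟨rfl, hj, hc.1, hc.2⟩
    · rw [if_neg hc] at hsome; cases hsome
  · rintro ⟨hy, hx, hix, hlt⟩
    exact ⟨x, hx, by rw [if_pos ⟨hix, hlt⟩, hy]⟩

-- outer loop of A over the suffix rest of l (l = pre ++ rest), with the
-- invariant characterising membership of acc, equals acc ++ B's flatMap over rest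
theorem pv_outer (l : List Int) (rest : List Int) :
    ∀ (pre : List Int), l = pre ++ rest →
    ∀ (acc : List (List Int)),
    (∀ x y : Int, x ∈ l → y ∈ l → x ≠ y →
        ([x, y] ∈ acc ↔ (List.idxOf y l < List.idxOf x l ∧ y ∈ pre))) →
    rest.foldl (fun l2 i =>
        l.foldl (fun l2 j =>
          if j ≠ i then
            if [i, j] ∉ l2 then l2 ++ [[j, i]] else l2
          else l2) l2) acc
      = acc ++ rest.flatMap (fun i =>
          l.filterMap (fun j =>
            if i ≠ j ∧ List.idxOf i l < List.idxOf j l then some [j, i] else none)) := by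
  induction rest with
  | nil => intro pre hpre acc H; simp
  | cons i0 rest ih =>
      intro pre hpre acc H
      have hi0 : i0 ∈ l := by rw [hpre]; simp
      have hidx : List.idxOf i0 l ≤ pre.length := by
        rw [hpre]; exact pv_idx_le_prefix i0 rest pre
      -- the inner loop's hypothesis: for j ∈ l, idx j < idx i0 forces j ∈ pre
      have Hin : ∀ j ∈ l, j ≠ i0 → ([i0, j] ∈ acc ↔ List.idxOf j l < List.idxOf i0 l) := by
        intro j hj hne
        rw [H i0 j hi0 hj (fun h => hne h.symm)]
        constructor
        · rintro ⟨h, _⟩; exact h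
        · intro h
          refine ⟨h, ?_⟩
          have : List.idxOf j l < pre.length := lt_of_lt_of_le h hidx
          rw [hpre] at hj this
          exact pv_mem_prefix hj this
      simp only [List.foldl_cons, List.flatMap_cons]
      rw [pv_inner l i0 hi0 l (fun _ h => h) acc Hin]
      rw [ih (pre ++ [i0]) (by simpa using hpre)
        (acc ++ l.filterMap (fun j =>
            if i0 ≠ j ∧ List.idxOf i0 l < List.idxOf j l then some [j, i0] else none))
        ?_]
      · simp
      · intro x y hx hy hne
        rw [List.mem_append, H x y hx hy hne, pv_mem_new]
        have hnei : List.idxOf x l ≠ List.idxOf y l := pv_idx_inj hx hy hne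
        constructor
        · rintro (⟨h, hp⟩ | ⟨hyi, _, _, hlt⟩)
          · exact ⟨h, by simp [hp]⟩
          · subst hyi; exact ⟨hlt, by simp⟩
        · rintro ⟨h, hp⟩
          rcases List.mem_append.mp hp with hp | hp
          · exact Or.inl ⟨h, hp⟩
          · simp at hp
            subst hp
            exact Or.inr ⟨rfl, hx, Ne.symm hne, h⟩

-- ===== VERDICT (by name: the statement is the Claim_ definition above) =====
theorem make_combos_spec : Claim_equal_make_combos := by
  intro l _
  unfold Spec_make_combos make_combos make_combos_alt
  rw [pv_outer l l [] rfl [] (by simp)]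
  simp
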